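-- pv_equiv track=rewrite | github.com/BroJun/PAT-Basic-Level-Practice | 1035.py | Insertion_onestep
-- ===== SOURCE A (Python) =====
-- def Insertion_onestep(a_list):
-- 	p = 0;
-- 	flag = 0;
-- 	while p < len(a_list)-1:
-- 		if a_list[p+1]<a_list[p]:
-- 			flag = 1
-- 			break
-- 		p += 1
-- 	p += 1
-- 	if flag == 1:
-- 		temp = a_list[p]
-- 		a_list.pop(p)
-- 		for i in range(0,p):
-- 			if a_list[i]>temp:
-- 				a_list.insert(i,temp)
-- 				break
-- 	return a_list
-- ===== SOURCE B (Python) =====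
-- def Insertion_onestep(a_list):
--     # One step of insertion sort: find the first descent, then place the
--     # offending element into the sorted prefix by binary search and a single
--     # slice shift (instead of A's pop + linear scan + insert).
--     # Mutates a_list in place, like A.
--     for k in range(len(a_list) - 1):
--         if a_list[k + 1] < a_list[k]:
--             p = k + 1
--             temp = a_list[p]
--             # bisect_right on the sorted prefix a_list[0:p], written by hand
--             lo, hi = 0, p
--             while lo < hi:
--                 mid = (lo + hi) // 2
--                 if a_list[mid] > temp:
--                     hi = mid
--                 else:
--                     lo = mid + 1
--             a_list[lo:p + 1] = [temp] + a_list[lo:p]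
--             return a_list
--     return a_list
-- ===== Notes on version B (the rewrite author's own statement) =====
-- stated objective: idiomatic
-- what changed: B keeps the scan for the first descent but replaces A's pop + linear search + insert with a hand-written bisect_right binary search on the sorted prefix and a single slice splice.
import Mathlib
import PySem

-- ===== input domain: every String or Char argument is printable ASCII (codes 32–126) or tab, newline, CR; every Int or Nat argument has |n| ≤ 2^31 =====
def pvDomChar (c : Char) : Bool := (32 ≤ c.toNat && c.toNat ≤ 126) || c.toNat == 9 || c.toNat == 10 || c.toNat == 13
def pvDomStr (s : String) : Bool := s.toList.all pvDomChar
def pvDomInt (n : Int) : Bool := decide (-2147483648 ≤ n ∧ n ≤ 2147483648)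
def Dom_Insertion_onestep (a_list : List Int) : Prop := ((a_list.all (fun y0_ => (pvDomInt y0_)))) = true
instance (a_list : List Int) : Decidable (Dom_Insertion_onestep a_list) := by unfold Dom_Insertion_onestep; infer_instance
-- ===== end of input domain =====

-- B replaces A's pop + linear scan + insert with a hand-written binary search on the sorted
-- prefix plus a single slice splice (idiomatic/alternative; the scan for the descent is kept).
-- A mutates a_list in place and returns it; the equivalence proved here is about the return
-- value (B performs the same in-place mutation in Python).

-- ===== PORT A =====
-- the while loop: returns (p, flag); indices p, p+1 are in range whenever read (guard), so
-- List.getD is exact; 'p < len - 1' over Nat matches Python since p ≥ 0 throughout.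
def aWhile (a : List Int) (p : Nat) : Nat → Nat × Nat
  | 0 => (p, 0)
  | fuel + 1 =>
    if p < a.length - 1 then
      if a.getD (p + 1) 0 < a.getD p 0 then (p, 1)
      else aWhile a (p + 1) fuel
    else (p, 0)

-- 'for i in range(0, p): if a[i] > temp: a.insert(i, temp); break'
def aInsLoop (a : List Int) (temp : Int) (p i : Nat) : List Int :=
  if i < p then
    if temp < a.getD i 0 then PySem.List.insert a (i : Int) temp
    else aInsLoop a temp p (i + 1)
  else a
termination_by p - i

def Insertion_onestep (a_list : List Int) : List Int :=
  let r := aWhile a_list 0 a_list.length   -- fuel = len suffices: p increases each iteration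
  let p := r.1 + 1
  if r.2 = 1 then
    let temp := a_list.getD p 0            -- in range when flag = 1
    let a' := a_list.eraseIdx p            -- a_list.pop(p), index in range when flag = 1
    aInsLoop a' temp p 0
  else a_list

-- ===== PORT B =====
-- the hand-written bisect_right loop of Source B
def bBisect (a : List Int) (temp : Int) (lo hi : Nat) : Nat :=
  if h : lo < hi then
    let mid := (lo + hi) / 2
    if temp < a.getD mid 0 then bBisect a temp lo mid
    else bBisect a temp (mid + 1) hi
  else lo
termination_by hi - lo
decreasing_by all_goals omega

-- temp = a[p]; lo = bisect; a[lo:p+1] = [temp] + a[lo:p]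
def bMove (a : List Int) (p : Nat) : List Int :=
  let temp := a.getD p 0
  let lo := bBisect a temp 0 p
  a.take lo ++ (temp :: PySem.List.slice a (some (lo : Int)) (some (p : Int))) ++ a.drop (p + 1)

-- 'for k in range(len(a)-1): if a[k+1] < a[k]: <move, return>' ; falls through to 'return a'
def bScan (a : List Int) (k : Nat) : Nat → List Int
  | 0 => a
  | fuel + 1 =>
    if k < a.length - 1 then
      if a.getD (k + 1) 0 < a.getD k 0 then bMove a (k + 1)
      else bScan a (k + 1) fuel
    else a

def Insertion_onestep_alt (a_list : List Int) : List Int :=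
  bScan a_list 0 a_list.length

-- ===== PRECONDITION & SPEC =====
def Spec_Insertion_onestep (a_list : List Int) (out : List Int) : Prop := out = Insertion_onestep_alt a_list
instance (a_list : List Int) (out : List Int) : Decidable (Spec_Insertion_onestep a_list out) := by unfold Spec_Insertion_onestep; infer_instance

-- ===== CLAIM (what is proved, stated in full; the proofs are below) =====
def Claim_equal_Insertion_onestep : Prop := ∀ (a_list : List Int), Dom_Insertion_onestep a_list → Spec_Insertion_onestep a_list (Insertion_onestep a_list)

-- ===== LEMMAS AND PROOFS =====

-- the prefix below a descent-free bound is monotone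
lemma getD_mono (a : List Int) (q : Nat)
    (hsort : ∀ j, j < q → a.getD j 0 ≤ a.getD (j + 1) 0) :
    ∀ i j, i ≤ j → j ≤ q → a.getD i 0 ≤ a.getD j 0 := by
  intro i j hij hjq
  induction j with
  | zero =>
    have : i = 0 := by omega
    simp [this]
  | succ j ih =>
    rcases Nat.lt_or_ge i (j + 1) with h | h
    · exact le_trans (ih (by omega) (by omega)) (hsort j (by omega))
    · have : i = j + 1 := by omega
      simp [this]
  
-- eraseIdx keeps the prefix
lemma getD_eraseIdx_lt (a : List Int) (p j : Nat) (hj : j < p) (hp : p < a.length) :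
    (a.eraseIdx p).getD j 0 = a.getD j 0 := by
  rw [List.eraseIdx_eq_take_drop_succ]
  rw [List.getD_append]
  · rw [List.getD_eq_getElem?_getD, List.getD_eq_getElem?_getD, List.getElem?_take_of_lt hj]
  · simp; omega

-- the linear insertion loop hits the first index L with temp < a[L]
lemma aInsLoop_finds (a : List Int) (temp : Int) (p L : Nat)
    (hLp : L < p)
    (hL : temp < a.getD L 0)
    (hmin : ∀ j, j < L → ¬ temp < a.getD j 0) :
    ∀ i, i ≤ L → aInsLoop a temp p i = PySem.List.insert a (L : Int) temp := by
  have main : ∀ k i, L - i ≤ k → i ≤ L → aInsLoop a temp p i = PySem.List.insert a (L : Int) temp := by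
    intro k
    induction k with
    | zero =>
      intro i hk hi
      have : i = L := by omega
      subst this
      rw [aInsLoop, if_pos hLp, if_pos hL]
    | succ k ih =>
      intro i hk hi
      rcases Nat.eq_or_lt_of_le hi with h | h
      · subst h
        rw [aInsLoop, if_pos hLp, if_pos hL]
      · rw [aInsLoop, if_pos (by omega), if_neg (hmin i h)]
        exact ih (i + 1) (by omega) (by omega)
  exact fun i hi => main (L - i) i (le_refl _) hi

-- the binary search converges to the boundary L
lemma bBisect_finds (a : List Int) (temp : Int) (L : Nat)
    (hlow : ∀ j, j < L → ¬ temp < a.getD j 0) :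
    ∀ lo hi, lo ≤ L → L ≤ hi →
      (∀ j, L ≤ j → j < hi → temp < a.getD j 0) →
      bBisect a temp lo hi = L := by
  have main : ∀ k lo hi, hi - lo ≤ k → lo ≤ L → L ≤ hi →
      (∀ j, L ≤ j → j < hi → temp < a.getD j 0) → bBisect a temp lo hi = L := by
    intro k
    induction k with
    | zero =>
      intro lo hi hk h1 h2 _
      rw [bBisect, dif_neg (by omega)]
      omega
    | succ k ih =>
      intro lo hi hk h1 h2 hhigh
      by_cases hlt : lo < hi
      · rw [bBisect, dif_pos hlt]
        simp only []
        by_cases hc : temp < a.getD ((lo + hi) / 2) 0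
        · rw [if_pos hc]
          have hLm : L ≤ (lo + hi) / 2 := by
            by_contra h
            exact hlow _ (by omega) hc
          exact ih lo ((lo + hi) / 2) (by omega) h1 hLm
            (fun j hj1 hj2 => hhigh j hj1 (by omega))
        · rw [if_neg hc]
          have : (lo + hi) / 2 < L := by
            by_contra h
            exact hc (hhigh _ (by omega) (by omega))
          exact ih ((lo + hi) / 2 + 1) hi (by omega) (by omega) h2 hhigh
      · rw [bBisect, dif_neg hlt]
        omega
  exact fun lo hi h1 h2 h3 => main (hi - lo) lo hi (le_refl _) h1 h2 h3

-- the move steps agree at a descent q (sorted prefix up to q)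
lemma move_eq (a : List Int) (q : Nat)
    (hq : q + 1 < a.length)
    (hdesc : a.getD (q + 1) 0 < a.getD q 0)
    (hsort : ∀ j, j < q → a.getD j 0 ≤ a.getD (j + 1) 0) :
    aInsLoop (a.eraseIdx (q + 1)) (a.getD (q + 1) 0) (q + 1) 0 = bMove a (q + 1) := by
  set temp := a.getD (q + 1) 0 with htemp
  have hex : ∃ i, temp < a.getD i 0 := ⟨q, hdesc⟩
  set L := Nat.find hex with hLdef
  have hL : temp < a.getD L 0 := Nat.find_spec hex
  have hLq : L ≤ q := Nat.find_min' hex hdesc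
  have hmin : ∀ j, j < L → ¬ temp < a.getD j 0 := fun j hj => Nat.find_min hex hj
  have hpre : ∀ j, j < q + 1 → (a.eraseIdx (q + 1)).getD j 0 = a.getD j 0 :=
    fun j hj => getD_eraseIdx_lt a (q + 1) j hj hq
  -- A's linear scan inserts at L
  rw [aInsLoop_finds (a.eraseIdx (q + 1)) temp (q + 1) L (by omega)
        (by rw [hpre L (by omega)]; exact hL)
        (fun j hj => by rw [hpre j (by omega)]; exact hmin j (by omega)) 0 (Nat.zero_le _)]
  -- B's binary search finds the same L
  unfold bMove
  change _ = List.take (bBisect a temp 0 (q + 1)) a ++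
      temp :: PySem.List.slice a (some ((bBisect a temp 0 (q + 1) : Nat) : Int)) (some ((q + 1 : Nat) : Int)) ++
      List.drop (q + 1 + 1) a
  rw [bBisect_finds a temp L hmin 0 (q + 1) (Nat.zero_le _) (by omega)
        (fun j hjL hjq =>
          lt_of_lt_of_le hL (getD_mono a q hsort L j hjL (by omega)))]
  -- both sides are take L ++ temp :: (middle segment) ++ tail
  have hLlen : L ≤ (a.eraseIdx (q + 1)).length := by
    rw [List.length_eraseIdx_of_lt hq]; omega
  rw [PySem.List.insert_natCast _ _ _ hLlen]
  rw [PySem.List.slice_natCast]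
  rw [List.eraseIdx_eq_take_drop_succ]
  have htk : (a.take (q + 1)).length = q + 1 := List.length_take_of_le (by omega)
  rw [List.take_append_of_le_length (by omega), List.drop_append_of_le_length (by omega)]
  simp [List.take_take, List.drop_take, Nat.min_eq_left (by omega : L ≤ q + 1)]

-- the two scans run in lockstep
lemma scan_eq (a : List Int) :
    ∀ fuel p, (∀ j, j < p → a.getD j 0 ≤ a.getD (j + 1) 0) →
      (let r := aWhile a p fuel
       if r.2 = 1 then aInsLoop (a.eraseIdx (r.1 + 1)) (a.getD (r.1 + 1) 0) (r.1 + 1) 0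
       else a)
      = bScan a p fuel := by
  intro fuel
  induction fuel with
  | zero => intro p _; simp [aWhile, bScan]
  | succ fuel ih =>
    intro p hsort
    simp only [aWhile, bScan]
    by_cases h1 : p < a.length - 1
    · by_cases h2 : a.getD (p + 1) 0 < a.getD p 0
      · simp only [h1, h2, if_true]
        exact move_eq a p (by omega) h2 hsort
      · simp only [h1, h2, if_true, if_false]
        exact ih (p + 1) (by
          intro j hj
          rcases Nat.lt_or_ge j p with h | h
          · exact hsort j h
          · have : j = p := by omega
            subst this
            omega)
    · simp [h1]

-- ===== VERDICT (by name: the statement is the Claim_ definition above) =====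
theorem Insertion_onestep_spec : Claim_equal_Insertion_onestep := by
  intro a _
  show Insertion_onestep a = Insertion_onestep_alt a
  unfold Insertion_onestep Insertion_onestep_alt
  have := scan_eq a a.length 0 (by omega)
  simpa using this
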